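-- pv_equiv track=rewrite | github.com/IsmahanIdow1/Implementation-of-Simple-Document-Searching | DocSearch.py | build_dictionary_and_index
-- ===== SOURCE A (Python) =====
-- def build_dictionary_and_index(documents):
--     dictionary_set = set()
--     inverted_index = {}
--     document_word_counts = []
--
--     for doc_id, document in enumerate(documents, start=1):
--         words = document.split()
--         word_counts = {}
--
--         for word in words:
--             dictionary_set.add(word)
--             if word in word_counts:
--                 word_counts[word] += 1
--             else:
--                 word_counts[word] = 1
--
--         document_word_counts.append(word_counts)
--
--         for word in word_counts:
--             if word not in inverted_index:
--                 inverted_index[word] = []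
--             inverted_index[word].append(doc_id)
--
--     dictionary = sorted(dictionary_set)
--     return dictionary, inverted_index, document_word_counts
-- ===== SOURCE B (Python) =====
-- def build_dictionary_and_index(documents):
--     # Transposed, comprehension-based construction: no incremental dict
--     # mutation anywhere.  Counts come from list.count over deduplicated
--     # word lists; the inverted index is built per WORD by scanning which
--     # documents contain it; the vocabulary is the sorted dedup of all words.
--     all_words = [document.split() for document in documents]
--     document_word_counts = [
--         {w: ws.count(w) for w in dict.fromkeys(ws)} for ws in all_words
--     ]
--     order = dict.fromkeys(w for ws in all_words for w in ws)
--     inverted_index = {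
--         w: [i for i, ws in enumerate(all_words, 1) if w in ws] for w in order
--     }
--     dictionary = sorted(order)
--     return dictionary, inverted_index, document_word_counts
-- ===== Notes on version B (the rewrite author's own statement) =====
-- stated objective: simpler
-- what changed: B builds everything by comprehensions with no incremental dict mutation: per-document counts come from dict.fromkeys-dedup plus list.count scans, the inverted index is built transposed (per word, scanning which documents contain it) instead of appending doc ids while iterating documents, and the vocabulary is the sorted global dedup.
import Mathlib
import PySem

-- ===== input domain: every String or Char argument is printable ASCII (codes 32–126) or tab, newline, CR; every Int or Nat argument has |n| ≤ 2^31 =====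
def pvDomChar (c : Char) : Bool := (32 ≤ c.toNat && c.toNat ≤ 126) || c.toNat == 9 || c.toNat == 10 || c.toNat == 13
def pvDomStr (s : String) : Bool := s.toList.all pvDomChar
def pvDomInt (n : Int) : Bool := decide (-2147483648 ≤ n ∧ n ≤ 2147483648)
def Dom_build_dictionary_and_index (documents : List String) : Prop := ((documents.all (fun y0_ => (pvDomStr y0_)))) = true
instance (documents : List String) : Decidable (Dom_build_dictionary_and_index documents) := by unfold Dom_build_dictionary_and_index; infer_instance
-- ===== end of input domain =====

-- B replaces A's incremental dict-mutating loop by comprehensions: counts via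
-- dedup + list.count, the inverted index transposed (per word, scanning documents),
-- vocabulary as the sorted global dedup; objective: simpler, not faster.

-- ===== PORT A =====
def build_dictionary_and_index (documents : List String) : List String × (List (String × List Int)) × (List (List (String × Int))) :=
  let st :=
    (PySem.List.enumerate documents 1).foldl
      (fun (st : PySem.Set String × PySem.Dict String (List Int) × List (PySem.Dict String Int)) p =>
        let words := PySem.Str.split₀ p.2
        let inner := words.foldl
          (fun (q : PySem.Set String × PySem.Dict String Int) w =>
            (PySem.Set.add q.1 w,
             if q.2.contains w then q.2.insert w (q.2.getD w 0 + 1) else q.2.insert w 1))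
          (st.1, PySem.Dict.empty)
        let dwc := st.2.2 ++ [inner.2]
        let inv := inner.2.keys.foldl
          (fun d w =>
            let d1 := if d.contains w then d else d.insert w []
            d1.insert w (d1.getD w [] ++ [p.1])) st.2.1
        (inner.1, inv, dwc))
      (PySem.Set.empty, PySem.Dict.empty, ([] : List (PySem.Dict String Int)))
  (PySem.List.sorted st.1 (fun x => x) false, st.2.1.items, st.2.2.map (fun d => d.items))

-- ===== PORT B =====
def build_dictionary_and_index_alt (documents : List String) : List String × (List (String × List Int)) × (List (List (String × Int))) :=
  let all_words := documents.map PySem.Str.split₀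
  -- {w: ws.count(w) for w in dict.fromkeys(ws)} for each document
  let document_word_counts : List (List (String × Int)) :=
    all_words.map (fun ws =>
      (PySem.List.dedup ws).map (fun w => (w, (PySem.List.count ws w : Int))))
  -- dict.fromkeys over the flattened word stream
  let order := PySem.List.dedup all_words.flatten
  -- {w: [i for i, ws in enumerate(all_words, 1) if w in ws] for w in order}
  let inverted_index : List (String × List Int) :=
    order.map (fun w =>
      (w, ((PySem.List.enumerate all_words 1).filter (fun p => p.2.contains w)).map (·.1)))
  (PySem.List.sorted order (fun x => x) false, inverted_index, document_word_counts)

-- ===== PRECONDITION & SPEC =====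
def Spec_build_dictionary_and_index (documents : List String) (out : List String × (List (String × List Int)) × (List (List (String × Int)))) : Prop := out = build_dictionary_and_index_alt documents
instance (documents : List String) (out : List String × (List (String × List Int)) × (List (List (String × Int)))) : Decidable (Spec_build_dictionary_and_index documents out) := by unfold Spec_build_dictionary_and_index; infer_instance

-- ===== CLAIM (what is proved, stated in full; the proofs are below) =====
def Claim_equal_build_dictionary_and_index : Prop := ∀ (documents : List String), Dom_build_dictionary_and_index documents → Spec_build_dictionary_and_index documents (build_dictionary_and_index documents)

-- ===== LEMMAS AND PROOFS =====

-- A's per-document counter, as a named function (= collections.Counter of the words).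
def pvWc (document : String) : PySem.Dict String Int :=
  (PySem.Str.split₀ document).foldl
    (fun c w => c.insert w (c.getD w 0 + 1)) PySem.Dict.empty

-- clean form of A's outer loop body.
def pvCleanStep (st : PySem.Set String × PySem.Dict String (List Int) × List (PySem.Dict String Int))
    (p : Int × String) : PySem.Set String × PySem.Dict String (List Int) × List (PySem.Dict String Int) :=
  (PySem.Set.update st.1 (PySem.Str.split₀ p.2),
   (pvWc p.2).keys.foldl (fun d w => d.modify w [] (· ++ [p.1])) st.2.1,
   st.2.2 ++ [pvWc p.2])

theorem pvWc_eq_counter (document : String) :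
    pvWc document = PySem.Dict.counter (PySem.Str.split₀ document) :=
  PySem.Dict.foldl_insert_getD_add_one_eq_counter _

-- A's word_counts step equals the unconditional counter step.
theorem pv_stepA_eq (d : PySem.Dict String Int) (w : String) :
    (if d.contains w then d.insert w (d.getD w 0 + 1) else d.insert w 1)
      = d.insert w (d.getD w 0 + 1) := by
  by_cases h : d.contains w = true
  · simp [h]
  · simp only [Bool.not_eq_true] at h
    simp [h, PySem.Dict.getD_of_not_contains]

-- A's inner pair fold splits into a set update and the counter fold.
theorem pv_pairfold (ws : List String) (s : PySem.Set String) (c : PySem.Dict String Int) :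
    ws.foldl (fun q w => (PySem.Set.add q.1 w, q.2.insert w (q.2.getD w 0 + 1))) (s, c)
      = (PySem.Set.update s ws, ws.foldl (fun c w => c.insert w (c.getD w 0 + 1)) c) := by
  induction ws generalizing s c with
  | nil => rfl
  | cons w ws ih => simp [List.foldl, PySem.Set.update_cons, ih]

-- A's inverted-index body equals a modify.
theorem pv_invbody_eq (d : PySem.Dict String (List Int)) (w : String) (i : Int) :
    ((if d.contains w then d else d.insert w []).insert w
       ((if d.contains w then d else d.insert w []).getD w [] ++ [i]))
      = d.modify w [] (· ++ [i]) := by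
  by_cases h : d.contains w = true
  · simp [h, PySem.Dict.modify]
  · simp only [Bool.not_eq_true] at h
    simp [h, PySem.Dict.modify, PySem.Dict.getD_insert_self, PySem.Dict.insert_insert_self,
      PySem.Dict.getD_of_not_contains]

-- A's whole outer loop body IS pvCleanStep.
theorem pv_fun_eq :
    (fun (st : PySem.Set String × PySem.Dict String (List Int) × List (PySem.Dict String Int))
         (p : Int × String) =>
        let words := PySem.Str.split₀ p.2
        let inner := words.foldl
          (fun (q : PySem.Set String × PySem.Dict String Int) w =>
            (PySem.Set.add q.1 w,
             if q.2.contains w then q.2.insert w (q.2.getD w 0 + 1) else q.2.insert w 1))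
          (st.1, PySem.Dict.empty)
        let dwc := st.2.2 ++ [inner.2]
        let inv := inner.2.keys.foldl
          (fun d w =>
            let d1 := if d.contains w then d else d.insert w []
            d1.insert w (d1.getD w [] ++ [p.1])) st.2.1
        (inner.1, inv, dwc)) = pvCleanStep := by
  funext st p
  simp only [pv_stepA_eq, pv_pairfold, pv_invbody_eq, pvCleanStep, pvWc]

-- enumerate commutes with map.
theorem pv_enumerate_map {α β : Type} (f : α → β) (xs : List α) (n : Int) :
    PySem.List.enumerate (xs.map f) n
      = (PySem.List.enumerate xs n).map (fun p => (p.1, f p.2)) := by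
  induction xs generalizing n with
  | nil => rfl
  | cons x xs ih => simp [PySem.List.enumerate_cons, ih]

-- update by a deduplicated list is the same update.
theorem pv_update_ofList (s : PySem.Set String) (xs : List String) :
    PySem.Set.update s (PySem.Set.ofList xs) = PySem.Set.update s xs := by
  rw [PySem.Set.update_eq_append_filter, PySem.Set.update_eq_append_filter,
    PySem.Set.ofList_ofList]

-- main decomposition of the clean fold, componentwise.
theorem pv_main (docs : List String) (n : Int) (s : PySem.Set String)
    (d : PySem.Dict String (List Int)) (acc : List (PySem.Dict String Int)) :
    (PySem.List.enumerate docs n).foldl pvCleanStep (s, d, acc)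
      = (docs.foldl (fun K doc => PySem.Set.update K (PySem.Str.split₀ doc)) s,
         (PySem.List.enumerate docs n).foldl
           (fun d p => (pvWc p.2).keys.foldl (fun d w => d.modify w [] (· ++ [p.1])) d) d,
         acc ++ docs.map pvWc) := by
  induction docs generalizing n s d acc with
  | nil => simp [PySem.List.enumerate_nil]
  | cons doc docs ih =>
    simp only [PySem.List.enumerate_cons, List.foldl, List.map_cons]
    rw [ih]
    simp [pvCleanStep]

-- a nested fold is the fold over the flatMap.
theorem pv_foldl_flatMap {α β γ : Type} (l : List α) (g : α → List β)
    (step : γ → β → γ) (d : γ) :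
    l.foldl (fun d p => (g p).foldl step d) d = (l.flatMap g).foldl step d := by
  induction l generalizing d with
  | nil => rfl
  | cons a l ih => simp [List.foldl, List.flatMap_cons, List.foldl_append, ih]

-- a fold over an iterable updates the set by the same iterable.
theorem pv_foldl_update (wss : List (List String)) (s : PySem.Set String) :
    wss.foldl (fun K ws => PySem.Set.update K ws) s = PySem.Set.update s wss.flatten := by
  induction wss generalizing s with
  | nil => simp [PySem.Set.update_nil]
  | cons ws wss ih => simp [List.foldl, ih, PySem.Set.update_append]

-- dedup through per-element dedup of a flatMap.
theorem pv_update_flatMap_ofList {α : Type} (l : List α) (f : α → List String)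
    (s : PySem.Set String) :
    PySem.Set.update s (l.flatMap (fun p => PySem.Set.ofList (f p)))
      = PySem.Set.update s (l.flatMap f) := by
  induction l generalizing s with
  | nil => rfl
  | cons a l ih =>
    simp only [List.flatMap_cons, PySem.Set.update_append, pv_update_ofList, ih]

-- filtering a Nodup list for one element.
theorem pv_filter_beq_nodup (s : List String) (hs : s.Nodup) (w : String) :
    s.filter (fun x => x == w) = if s.contains w then [w] else [] := by
  induction s with
  | nil => simp
  | cons a s ih =>
    rcases List.nodup_cons.mp hs with ⟨ha, hnd⟩
    by_cases h : a = w
    · subst h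
      simp [ih hnd, List.contains_eq_mem, ha]
    · simp [h, ih hnd, List.contains_eq_mem, Ne.symm h]

-- the per-word postings of the flattened pair stream.
theorem pv_filter_pairs (l : List (Int × List String)) (w : String) :
    ((l.flatMap (fun p => (PySem.Set.ofList p.2).map (fun w' => (w', p.1)))).filter
        (fun q => q.1 == w)).map (·.2)
      = (l.filter (fun p => p.2.contains w)).map (·.1) := by
  induction l with
  | nil => rfl
  | cons p l ih =>
    simp only [List.flatMap_cons, List.filter_append, List.map_append, ih]
    rw [List.filter_map]
    have hflt : List.filter ((fun (q : String × Int) => q.1 == w) ∘ (fun w' => (w', p.1)))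
        (PySem.Set.ofList p.2) = if p.2.contains w then [w] else [] := by
      rw [show ((fun (q : String × Int) => q.1 == w) ∘ (fun w' => (w', p.1)))
            = (fun x => x == w) from rfl,
        pv_filter_beq_nodup _ (PySem.Set.nodup_ofList _) w]
      simp [List.contains_eq_mem, PySem.Set.mem_ofList]
    rw [hflt]
    by_cases h : w ∈ p.2 <;> simp [h, List.contains_eq_mem]

-- items of A's inverted-index fold, over a generic (doc_id, words) list.
theorem pv_inv_items (l : List (Int × List String)) :
    ((l.foldl (fun d p => (PySem.Set.ofList p.2).foldl
        (fun d w => d.modify w [] (· ++ [p.1])) d) (PySem.Dict.empty : PySem.Dict String (List Int)))).items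
      = (PySem.Set.ofList (l.flatMap (fun p => p.2))).map
          (fun w => (w, (l.filter (fun p => p.2.contains w)).map (·.1))) := by
  have hstep : (fun (d : PySem.Dict String (List Int)) (p : Int × List String) =>
      (PySem.Set.ofList p.2).foldl (fun d w => d.modify w [] (· ++ [p.1])) d)
      = (fun d p => (((PySem.Set.ofList p.2).map (fun w => (w, p.1))).foldl
          (fun d (q : String × Int) => d.modify q.1 [] (· ++ [q.2])) d)) := by
    funext d p
    rw [List.foldl_map]
  rw [hstep, pv_foldl_flatMap]
  set P := l.flatMap (fun p => (PySem.Set.ofList p.2).map (fun w => (w, p.1))) with hP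
  have hnd : ((P.foldl (fun d (q : String × Int) => d.modify q.1 [] (· ++ [q.2]))
      (PySem.Dict.empty : PySem.Dict String (List Int)))).keys.Nodup := by
    exact PySem.Dict.nodup_keys_foldl_modify_key _ _ _ _ _ PySem.Dict.nodup_keys_empty
  rw [PySem.Dict.items_eq_map_keys _ hnd ([] : List Int)]
  have hkeys : ((P.foldl (fun d (q : String × Int) => d.modify q.1 [] (· ++ [q.2]))
      (PySem.Dict.empty : PySem.Dict String (List Int)))).keys
      = PySem.Set.ofList (l.flatMap (fun p => p.2)) := by
    rw [PySem.Dict.keys_foldl_modify_key]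
    rw [show (PySem.Dict.empty : PySem.Dict String (List Int)).keys = [] from rfl]
    rw [PySem.Set.update_nil_left, hP]
    rw [List.map_flatMap]
    simp only [List.map_map]
    rw [show (fun (p : Int × List String) => List.map ((·.1) ∘ fun w => (w, p.1)) (PySem.Set.ofList p.2))
          = (fun p => (PySem.Set.ofList p.2).map id) from rfl]
    simp only [List.map_id]
    rw [← PySem.Set.update_nil_left, pv_update_flatMap_ofList, PySem.Set.update_nil_left]
  rw [hkeys]
  apply List.map_congr_left
  intro w _
  rw [PySem.Dict.getD_foldl_modify_append, PySem.Dict.getD_empty, List.nil_append, hP,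
    pv_filter_pairs]

-- ===== VERDICT (by name: the statement is the Claim_ definition above) =====
theorem build_dictionary_and_index_spec : Claim_equal_build_dictionary_and_index := by
  intro documents _
  unfold Spec_build_dictionary_and_index build_dictionary_and_index build_dictionary_and_index_alt
  rw [pv_fun_eq, pv_main]
  dsimp only
  refine Prod.ext ?_ (Prod.ext ?_ ?_)
  · -- dictionary
    rw [show (fun (K : PySem.Set String) (doc : String) => PySem.Set.update K (PySem.Str.split₀ doc))
          = (fun K doc => (fun (K : PySem.Set String) (ws : List String) => PySem.Set.update K ws) K (PySem.Str.split₀ doc)) from rfl,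
      ← List.foldl_map, pv_foldl_update]
    rw [show (PySem.Set.empty : PySem.Set String) = [] from rfl, PySem.Set.update_nil_left,
      PySem.List.dedup_eq_ofList]
  · -- inverted index
    simp only [pvWc_eq_counter, PySem.Dict.keys_counter]
    have h : (PySem.List.enumerate (documents.map PySem.Str.split₀) 1).foldl
          (fun (d : PySem.Dict String (List Int)) (q : Int × List String) =>
            (PySem.Set.ofList q.2).foldl (fun d w => d.modify w [] (· ++ [q.1])) d)
          PySem.Dict.empty
        = (PySem.List.enumerate documents 1).foldl
          (fun (d : PySem.Dict String (List Int)) (p : Int × String) =>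
            (PySem.Set.ofList (PySem.Str.split₀ p.2)).foldl (fun d w => d.modify w [] (· ++ [p.1])) d)
          PySem.Dict.empty := by
      rw [pv_enumerate_map, List.foldl_map]
    rw [← h, pv_inv_items]
    rw [PySem.List.dedup_eq_ofList]
    congr 1
    rw [List.flatMap_def, PySem.List.map_snd_enumerate]
  · -- document_word_counts
    simp only [List.nil_append, List.map_map, Function.comp_def, pvWc_eq_counter,
      PySem.Dict.items_counter, PySem.List.dedup_eq_ofList, PySem.List.count_eq]
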